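-- pv_equiv track=rewrite | github.com/kna163/partitions | src/partitions/parti.py | prev_part
-- ===== SOURCE A (Python) =====
-- Part = list[int]
--
-- def prev_part(part : Part) -> Part | None:
--     # ex. [6,4,1,1] -> [6,3,3]
--     # find # of 1s at the end and repeat number and dump rest
--     # [5,5,1,1,1,1,1] -> [5,4,4,2]
--     # [5,5] -> [5,4,1] -> [5,3,2] -> [5,3,1,1]
--     if not part or part[0] == 1:
--         return None
--     if part[-1] != 1:
--         return part[:-1] + [part[-1]-1,1]
--     cnt = 1
--     for i in range(1,len(part)-1):
--         if part[-i-1] == 1: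
--             cnt += 1
--         else:
--             break
--     a = part[-cnt-1]
--     rem = (cnt+a)%(a-1)
--     return part[:-cnt-1] + ((cnt+a)//(a-1)) * [a-1] + ([(cnt+a)%(a-1)] if rem != 0 else [])
-- ===== SOURCE B (Python) =====
-- def prev_part(part):
--     if not part or part[0] == 1:
--         return None
--     # scan from the end for the last non-1 entry
--     j = len(part) - 1
--     while part[j] == 1:
--         j -= 1
--     a = part[j]
--     total = (len(part) - 1 - j) + a   # trailing ones merged with a
--     d = a - 1
--     tail = []
--     while total >= d:                 # greedy: largest allowed part repeatedly
--         tail.append(d)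
--         total -= d
--     if total != 0:
--         tail.append(total)
--     return part[:j] + tail
-- ===== Notes on version B (the rewrite author's own statement) =====
-- stated objective: alternative
-- what changed: B replaces A's two-branch structure (special case for a last element > 1, plus a forward range loop with break and a //-% closed form) by one uniform path: scan backwards for the last non-1 entry, then rebuild the tail with a greedy repeated-subtraction loop.
-- outside the precondition, e.g. on prev_part([3, 0, 1]): A returns [3], B does not finish within the time limit; on prev_part([2, 0]): A returns [2, -1, 1], B does not finish within the time limit
import Mathlib
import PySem

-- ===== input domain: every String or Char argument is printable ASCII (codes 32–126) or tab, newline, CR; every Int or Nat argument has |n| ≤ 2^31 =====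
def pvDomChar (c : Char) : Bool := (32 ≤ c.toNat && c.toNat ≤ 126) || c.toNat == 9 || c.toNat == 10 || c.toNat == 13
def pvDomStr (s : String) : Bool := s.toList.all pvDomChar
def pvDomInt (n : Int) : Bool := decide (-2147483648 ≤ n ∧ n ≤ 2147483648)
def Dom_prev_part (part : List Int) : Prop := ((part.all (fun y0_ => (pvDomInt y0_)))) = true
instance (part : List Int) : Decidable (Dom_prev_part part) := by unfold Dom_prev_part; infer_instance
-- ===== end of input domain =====

-- B merges A's two branches (last element > 1 vs trailing 1s) into one uniform path: scan
-- backwards for the last non-1 entry, then rebuild the tail with a greedy repeated-subtraction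
-- loop instead of A's //-% closed form (objective: alternative, same cost).

-- ===== PORT A =====
-- the 'for i in range(1, len(part)-1): if part[-i-1] == 1: cnt += 1 else: break' loop
def pvCntLoop (part : List Int) : List Int → Int → Int
  | [], cnt => cnt
  | i :: rest, cnt =>
      if PySem.List.pyGetD part (-i - 1) 0 = 1 then pvCntLoop part rest (cnt + 1) else cnt

def prev_part (part : List Int) : Option (List Int) :=
  if part = [] ∨ part.head? = some 1 then none
  else if PySem.List.pyGetD part (-1) 0 ≠ 1 then
    some (PySem.List.slice part none (some (-1)) ++ [PySem.List.pyGetD part (-1) 0 - 1, 1])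
  else
    let cnt := pvCntLoop part (PySem.List.pyRange 1 (PySem.List.len part - 1) 1) 1
    let a := PySem.List.pyGetD part (-cnt - 1) 0
    let rem := PySem.Int.mod (cnt + a) (a - 1)
    some (PySem.List.slice part none (some (-cnt - 1)) ++
      PySem.List.pyRepeat [a - 1] (PySem.Int.floordiv (cnt + a) (a - 1)) ++
      (if rem ≠ 0 then [rem] else []))

-- ===== PORT B =====
-- 'j = len(part)-1; while part[j] == 1: j -= 1'  (structural recursion on j)
def pvFindJ (part : List Int) : Nat → Nat
  | 0 => 0
  | j + 1 => if part.getD (j + 1) 0 = 1 then pvFindJ part j else j + 1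

def pvGreedy (d : Int) (total : Int) : List Int :=
  if _h : 1 ≤ d ∧ d ≤ total then d :: pvGreedy d (total - d)
  else if total ≠ 0 then [total] else []
termination_by total.toNat
decreasing_by omega

-- part element lemmas
def prev_part_alt (part : List Int) : Option (List Int) :=
  if part = [] ∨ part.head? = some 1 then none
  else
    let j := pvFindJ part (part.length - 1)
    let a := part.getD j 0
    let total := ((part.length : Int) - 1 - (j : Int)) + a
    some (part.take j ++ pvGreedy (a - 1) total)

-- getD form of the element lemmas
-- ===== PRECONDITION & SPEC =====
-- Pre_ excludes inputs whose last non-1 entry is < 2 (not integer partitions): there A's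
-- //-% arithmetic on a nonpositive 'part size' returns an accidental value and B's greedy
-- subtraction loop does not terminate.
def Pre_prev_part (part : List Int) : Prop :=
  part = [] ∨ part.head? = some 1 ∨ 2 ≤ ((part.reverse.dropWhile (fun x => x == 1)).headD 0)
instance (part : List Int) : Decidable (Pre_prev_part part) := by unfold Pre_prev_part; infer_instance

def pvWitness_prev_part : List Int := [6, 4, 1, 1]

def Spec_prev_part (part : List Int) (out : Option (List Int)) : Prop := out = prev_part_alt part
instance (part : List Int) (out : Option (List Int)) : Decidable (Spec_prev_part part out) := by unfold Spec_prev_part; infer_instance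

-- ===== CLAIM (what is proved, stated in full; the proofs are below) =====
def Claim_equal_prev_part : Prop := ∀ (part : List Int), Dom_prev_part part → Pre_prev_part part → Spec_prev_part part (prev_part part)

-- ===== LEMMAS AND PROOFS =====

theorem pv_decomp (part : List Int) (hne : part ≠ []) (hh : part.head? ≠ some 1) :
    ∃ (xs : List Int) (a : Int) (k : Nat), part = xs ++ a :: List.replicate k 1 ∧ a ≠ 1 ∧
      ((part.reverse.dropWhile (fun x => x == 1)).headD 0) = a := by
  have hsplit : part.reverse.takeWhile (fun x : Int => x == 1) ++ part.reverse.dropWhile (fun x : Int => x == 1) = part.reverse := List.takeWhile_append_dropWhile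
  have hune : part.reverse.dropWhile (fun x : Int => x == 1) ≠ [] := by
    intro h0
    have hall := List.dropWhile_eq_nil_iff.mp h0
    obtain ⟨p0, rest, hp⟩ := List.exists_cons_of_ne_nil hne
    have hp0 : p0 ∈ part.reverse := by simp [hp]
    have : p0 = 1 := by simpa using hall p0 hp0
    apply hh; rw [hp]; simp [this]
  obtain ⟨a, u', hu⟩ := List.exists_cons_of_ne_nil hune
  have hhead := List.head_dropWhile_not (fun x : Int => x == 1) (l := part.reverse) hune
  have he : (part.reverse.dropWhile (fun x : Int => x == 1)).head hune = a := by simp [hu]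
  have ha' : a ≠ 1 := by rw [he] at hhead; simpa using hhead
  have htrep : part.reverse.takeWhile (fun x : Int => x == 1) =
      List.replicate (part.reverse.takeWhile (fun x : Int => x == 1)).length 1 := by
    rw [List.eq_replicate_iff]
    refine ⟨rfl, fun b hb => ?_⟩
    simpa using List.mem_takeWhile_imp (p := fun x : Int => x == 1) hb
  refine ⟨u'.reverse, a, (part.reverse.takeWhile (fun x : Int => x == 1)).length, ?_, ha', by rw [hu]; rfl⟩
  have hpart : part = (part.reverse.takeWhile (fun x : Int => x == 1) ++ part.reverse.dropWhile (fun x : Int => x == 1)).reverse := by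
    rw [hsplit, List.reverse_reverse]
  rw [hpart, List.reverse_append, hu, List.reverse_cons]
  rw [htrep]
  simp
  exact ha'

theorem pv_get_a (xs : List Int) (a : Int) (k : Nat) :
    (xs ++ a :: List.replicate k 1)[xs.length]? = some a := by
  simp

theorem pv_get_one (xs : List Int) (a : Int) (k : Nat) (p : Nat)
    (h1 : xs.length < p) (h2 : p < xs.length + k + 1) :
    (xs ++ a :: List.replicate k 1)[p]? = some 1 := by
  rw [List.getElem?_append_right (by omega)]
  have : p - xs.length = (p - xs.length - 1) + 1 := by omega
  rw [this]
  simp [List.getElem?_replicate]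
  omega

-- findJ
theorem pv_findJ_ones (part : List Int) (n : Nat) (hn : part.getD n 0 ≠ 1) :
    ∀ k : Nat, (∀ i : Nat, n < i → i ≤ n + k → part.getD i 0 = 1) → pvFindJ part (n + k) = n := by
  intro k
  induction k with
  | zero =>
    intro _
    cases n with
    | zero => simp [pvFindJ]
    | succ p =>
      show pvFindJ part (p + 1) = p + 1
      rw [pvFindJ, if_neg hn]
  | succ k ih =>
    intro hone
    have : n + (k + 1) = (n + k) + 1 := by omega
    rw [this, pvFindJ]
    rw [hone (n + k + 1) (by omega) (by omega)]
    simp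
    exact ih (fun i hi hik => hone i hi (by omega))

-- cntLoop
theorem pv_cntLoop_ones (part : List Int) (l1 l2 : List Int) :
    ∀ c : Int, (∀ i ∈ l1, PySem.List.pyGetD part (-i - 1) 0 = 1) →
      pvCntLoop part (l1 ++ l2) c = pvCntLoop part l2 (c + l1.length) := by
  induction l1 with
  | nil => intro c _; simp
  | cons i rest ih =>
    intro c hone
    rw [List.cons_append, pvCntLoop, if_pos (hone i (by simp))]
    rw [ih (c + 1) (fun i' hi' => hone i' (by simp [hi']))]
    push_cast [List.length_cons]
    ring_nf

theorem pv_cntLoop_stop (part : List Int) (i : Int) (l : List Int) (c : Int)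
    (h : PySem.List.pyGetD part (-i - 1) 0 ≠ 1) :
    pvCntLoop part (i :: l) c = c := by
  rw [pvCntLoop, if_neg h]

-- greedy = closed form, for positive divisor and nonnegative total
theorem pv_greedy_divmod (d : Int) (hd : 1 ≤ d) :
    ∀ m : Nat, ∀ t : Int, t.toNat = m → 0 ≤ t →
      pvGreedy d t = List.replicate (PySem.Int.floordiv t d).toNat d ++
        (if PySem.Int.mod t d ≠ 0 then [PySem.Int.mod t d] else []) := by
  intro m
  induction m using Nat.strong_induction_on with
  | _ m ih =>
    intro t hm ht
    rw [PySem.Int.floordiv_eq_ediv_of_pos (by omega), PySem.Int.mod_eq_emod_of_pos (by omega)]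
    by_cases hlt : t < d
    · have hq : t / d = 0 := Int.ediv_eq_zero_of_lt ht hlt
      have hr : t % d = t := Int.emod_eq_of_lt ht hlt
      rw [pvGreedy]
      rw [dif_neg (by omega)]
      rw [hq, hr]
      simp
    · rw [not_lt] at hlt
      have hq : t / d = (t - d) / d + 1 := by
        have := Int.add_mul_ediv_right (t - d) 1 (show d ≠ 0 by omega)
        have h2 := this
        simp at h2
        omega
      have hr : t % d = (t - d) % d := by
        conv_lhs => rw [show t = (t - d) + 1 * d by ring]
        rw [Int.add_mul_emod_self_right]
      rw [pvGreedy, dif_pos ⟨hd, hlt⟩]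
      rw [ih (t - d).toNat (by omega) (t - d) rfl (by omega)]
      rw [PySem.Int.floordiv_eq_ediv_of_pos (by omega), PySem.Int.mod_eq_emod_of_pos (by omega)]
      rw [hq, hr]
      have hq0 : 0 ≤ (t - d) / d := Int.ediv_nonneg (by omega) (by omega)
      have : ((t - d) / d + 1).toNat = ((t - d) / d).toNat + 1 := by omega
      rw [this, List.replicate_succ]
      simp

theorem pv_greedy_base (a : Int) (ha : 2 ≤ a) : pvGreedy (a - 1) a = [a - 1, 1] := by
  rw [pvGreedy, dif_pos ⟨by omega, by omega⟩]
  have h1 : a - (a - 1) = 1 := by ring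
  rw [h1]
  by_cases h2 : a = 2
  · subst h2
    norm_num
    rw [pvGreedy, dif_pos ⟨by omega, by omega⟩]
    rw [pvGreedy]
    norm_num
  · rw [pvGreedy, dif_neg (by omega)]
    simp

theorem pv_getD_a (xs : List Int) (a : Int) (k : Nat) :
    (xs ++ a :: List.replicate k 1).getD xs.length 0 = a := by
  rw [List.getD_eq_getElem?_getD, pv_get_a]
  rfl

theorem pv_getD_one (xs : List Int) (a : Int) (k : Nat) (p : Nat)
    (h1 : xs.length < p) (h2 : p < xs.length + k + 1) :
    (xs ++ a :: List.replicate k 1).getD p 0 = 1 := by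
  rw [List.getD_eq_getElem?_getD, pv_get_one xs a k p h1 h2]
  rfl

-- negative-index form: part[-(q+1)] for q ≤ length - 1
theorem pv_pyGetD_neg (xs : List Int) (a : Int) (k : Nat) (q : Nat)
    (hq : q ≤ xs.length + k) :
    PySem.List.pyGetD (xs ++ a :: List.replicate k 1) (-(q : Int) - 1) 0 =
      (xs ++ a :: List.replicate k 1).getD (xs.length + k - q) 0 := by
  have hlen : (xs ++ a :: List.replicate k 1).length = xs.length + k + 1 := by
    simp
    omega
  have h1 : (-(q : Int) - 1) = -(((q + 1 : Nat) : Int)) := by push_cast; ring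
  have h2 : PySem.List.pyGetD (xs ++ a :: List.replicate k 1) (-(q : Int) - 1) 0 =
      (PySem.List.pyGet? (xs ++ a :: List.replicate k 1) (-(q : Int) - 1)).getD 0 := by
    simp [PySem.List.pyGetD, PySem.List.pyGet?]
  rw [h2, h1]
  rw [PySem.List.pyGet?_neg_natCast _ (q + 1) (by omega) (by omega)]
  rw [List.getD_eq_getElem?_getD]
  have hidx : (xs ++ a :: List.replicate k 1).length - (q + 1) = xs.length + k - q := by
    omega
  rw [hidx]

theorem pv_main_k0 (xs : List Int) (a : Int) (ha : 2 ≤ a)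
    (hcond : ¬ (xs ++ [a] = [] ∨ (xs ++ [a]).head? = some 1)) :
    prev_part (xs ++ [a]) = prev_part_alt (xs ++ [a]) := by
  have hlen : (xs ++ [a]).length = xs.length + 1 := by simp
  have hget1 : PySem.List.pyGetD (xs ++ [a]) (-1) 0 = a :=
    PySem.List.pyGetD_neg_one_append_singleton xs a 0
  have hgetDn : (xs ++ [a]).getD xs.length 0 = a := by
    have h0 := pv_getD_a xs a 0
    rw [show (List.replicate 0 (1:Int)) = [] from rfl] at h0
    rw [show a :: ([] : List Int) = [a] from rfl] at h0
    exact h0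
  have hj : pvFindJ (xs ++ [a]) xs.length = xs.length := by
    have := pv_findJ_ones (xs ++ [a]) xs.length (by rw [hgetDn]; omega) 0 (by omega)
    simpa using this
  rw [prev_part, prev_part_alt, if_neg hcond, if_neg hcond]
  rw [if_pos (by rw [hget1]; omega)]
  simp only [hlen, Nat.add_sub_cancel]
  rw [hj, hget1, hgetDn]
  rw [PySem.List.slice_to_neg_one, List.dropLast_concat]
  have htot : ((xs.length + 1 : Nat) : Int) - 1 - (xs.length : Int) + a = a := by
    push_cast; ring
  rw [htot]
  have htake : (xs ++ [a]).take xs.length = xs := List.take_left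
  rw [htake, pv_greedy_base a ha]

theorem pv_main_kpos (xs : List Int) (a : Int) (k' : Nat) (ha : 2 ≤ a)
    (hcond : ¬ (xs ++ a :: List.replicate (k' + 1) 1 = [] ∨ (xs ++ a :: List.replicate (k' + 1) 1).head? = some 1)) :
    prev_part (xs ++ a :: List.replicate (k' + 1) 1) = prev_part_alt (xs ++ a :: List.replicate (k' + 1) 1) := by
  set part := xs ++ a :: List.replicate (k' + 1) 1 with hpart
  have hlen : part.length = xs.length + k' + 2 := by simp [hpart]; omega
  have hform : part = (xs ++ a :: List.replicate k' 1) ++ [1] := by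
    simp [hpart, List.replicate_succ']
  have hlast : PySem.List.pyGetD part (-1) 0 = 1 := by
    rw [hform]; exact PySem.List.pyGetD_neg_one_append_singleton _ 1 0
  -- the element facts
  have hgA : ∀ q : Nat, q ≤ xs.length + (k' + 1) →
      PySem.List.pyGetD part (-(q : Int) - 1) 0 = part.getD (xs.length + (k' + 1) - q) 0 :=
    fun q hq => pv_pyGetD_neg xs a (k' + 1) q hq
  have hgetn : part.getD xs.length 0 = a := pv_getD_a xs a (k' + 1)
  have hones : ∀ p : Nat, xs.length < p → p < xs.length + k' + 2 → part.getD p 0 = 1 :=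
    fun p h1 h2 => pv_getD_one xs a (k' + 1) p h1 (by omega)
  -- A's count loop returns k'+1
  have hcnt : pvCntLoop part (PySem.List.pyRange 1 ((part.length : Int) - 1) 1) 1 = ((k' + 1 : Nat) : Int) := by
    have hb : ((part.length : Int) - 1) = ((xs.length + k' + 1 : Nat) : Int) := by
      rw [hlen]; push_cast; ring
    rw [hb, PySem.List.pyRange_one_append 1 ((k' + 1 : Nat) : Int) _ (by push_cast; omega) (by push_cast; omega)]
    rw [pv_cntLoop_ones part _ _ 1 ?ones]
    case ones =>
      intro i hi
      rw [PySem.List.mem_pyRange_one] at hi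
      have hiq : i = ((i.toNat : Nat) : Int) := by omega
      rw [hiq, hgA i.toNat (by omega)]
      exact hones _ (by omega) (by omega)
    have hl1 : ((PySem.List.pyRange 1 ((k' + 1 : Nat) : Int)).length : Int) = (k' : Int) := by
      rw [PySem.List.length_pyRange_one]; omega
    rw [hl1]
    by_cases hn : xs.length = 0
    · rw [show ((xs.length + k' + 1 : Nat) : Int) = ((k' + 1 : Nat) : Int) by omega]
      rw [PySem.List.pyRange_one_eq_nil (le_refl _)]
      show (1 + (k' : Int)) = _
      push_cast; ring
    · rw [PySem.List.pyRange_one_cons (by push_cast; omega)]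
      rw [pv_cntLoop_stop part _ _ _ ?stop]
      case stop =>
        rw [show (-((k' + 1 : Nat) : Int) - 1) = (-(((k' + 1 : Nat) : Int)) - 1) by ring]
        rw [hgA (k' + 1) (by omega)]
        rw [show xs.length + (k' + 1) - (k' + 1) = xs.length by omega, hgetn]
        omega
      push_cast; ring
  -- B's backward scan returns xs.length
  have hj : pvFindJ part (xs.length + (k' + 1)) = xs.length := by
    exact pv_findJ_ones part xs.length (by rw [hgetn]; omega) (k' + 1)
      (fun i h1 h2 => hones i h1 (by omega))
  -- now assemble
  rw [prev_part, prev_part_alt, if_neg hcond, if_neg hcond]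
  rw [if_neg (by rw [hlast]; simp)]
  simp only [PySem.List.len_eq, hcnt]
  rw [show part.length - 1 = xs.length + (k' + 1) by omega, hj, hgetn]
  -- A's slice prefix is xs
  have hslice : PySem.List.slice part none (some (-((k' + 1 : Nat) : Int) - 1)) = xs := by
    rw [show (-((k' + 1 : Nat) : Int) - 1) = -(((k' + 2 : Nat) : Int)) by push_cast; ring]
    rw [PySem.List.slice_to_neg_natCast part (k' + 2) (by omega)]
    rw [hlen, show xs.length + k' + 2 - (k' + 2) = xs.length by omega]
    rw [hpart]; exact List.take_left
  rw [hslice]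
  -- A's a
  have haA : PySem.List.pyGetD part (-((k' + 1 : Nat) : Int) - 1) 0 = a := by
    rw [hgA (k' + 1) (by omega), show xs.length + (k' + 1) - (k' + 1) = xs.length by omega, hgetn]
  rw [haA]
  -- B's prefix
  have htake : part.take xs.length = xs := by rw [hpart]; exact List.take_left
  rw [htake]
  -- B's total
  have htot : ((part.length : Int) - 1 - (xs.length : Int) + a) = ((k' + 1 : Nat) : Int) + a := by
    rw [hlen]; push_cast; ring
  rw [htot]
  -- tail via the greedy/divmod bridge
  rw [PySem.List.pyRepeat_singleton]
  rw [pv_greedy_divmod (a - 1) (by omega) (((k' + 1 : Nat) : Int) + a).toNat _ rfl (by positivity)]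
  rw [List.append_assoc]

theorem pv_spec_main (part : List Int) (hcond : ¬ (part = [] ∨ part.head? = some 1))
    (hPre : 2 ≤ ((part.reverse.dropWhile (fun x => x == 1)).headD 0)) :
    prev_part part = prev_part_alt part := by
  have hne : part ≠ [] := fun h => hcond (Or.inl h)
  have hh : part.head? ≠ some 1 := fun h => hcond (Or.inr h)
  obtain ⟨xs, a, k, hp, _, hhead⟩ := pv_decomp part hne hh
  have ha : 2 ≤ a := by rw [hhead] at hPre; exact hPre
  subst hp
  cases k with
  | zero => exact pv_main_k0 xs a ha (by simpa using hcond)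
  | succ k' => exact pv_main_kpos xs a k' ha hcond

-- ===== VERDICT (by name: the statement is the Claim_ definition above) =====
theorem prev_part_spec : Claim_equal_prev_part := by
  intro part _ hPre
  unfold Spec_prev_part
  by_cases hcond : part = [] ∨ part.head? = some 1
  · rw [prev_part, prev_part_alt, if_pos hcond, if_pos hcond]
  · have h2 : 2 ≤ ((part.reverse.dropWhile (fun x => x == 1)).headD 0) := by
      rcases hPre with h | h | h
      · exact absurd (Or.inl h) hcond
      · exact absurd (Or.inr h) hcond
      · exact h
    exact pv_spec_main part hcond h2
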